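-- pv_equiv track=rewrite | github.com/ErvinCaraval/tests- | transcribe.py | _format_as_lyrics
-- ===== SOURCE A (Python) =====
-- def _format_as_lyrics(text: str) -> str:
--     """
--     Da formato al texto como letras de canción, aplicando un estilo específico.
--
--     Estrategia:
--     - Divide el texto en estrofas y versos.
--     - Aplica sangrías y saltos de línea para dar formato de canción.
--     """
--     if not text:
--         return text
--
--     # Divide en estrofas asumiendo que están separadas por dos saltos de línea
--     estrofas = [estrofa.strip() for estrofa in text.split("\n\n") if estrofa.strip()]
--
--     letras_formateadas = []
--     for estrofa in estrofas:
--         # Divide en versos asumiendo que están separados por un salto de línea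
--         versos = [verso.strip() for verso in estrofa.split("\n") if verso.strip()]
--         for verso in versos:
--             letras_formateadas.append(f"  {verso}")  # Sangría para el verso
--         letras_formateadas.append("")  # Salto de línea entre versos
--
--     return "\n".join(letras_formateadas).strip()
-- ===== SOURCE B (Python) =====
-- def _format_as_lyrics(text: str) -> str:
--     if not text:
--         return text
--     out = ""
--     pending_break = False
--     for line in text.split("\n"):
--         verse = line.strip()
--         if line == "":
--             pending_break = True
--         elif verse:
--             if not out:
--                 out = verse
--             else:
--                 out += ("\n\n" if pending_break else "\n") + "  " + verse
--             pending_break = False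
--     return out
-- ===== Notes on version B (the rewrite author's own statement) =====
-- stated objective: alternative
-- what changed: Replaces A's two-level parse (split the text into stanzas at double newlines, re-split and strip each stanza, indent every verse, join a flat list with empty-string sentinels, final strip) by a single left-to-right state machine over the list of lines that keeps an output accumulator and a pending-break flag, emits the first verse unindented and each later verse with its separator, and needs no stanza split, no sentinels and no final strip.
import Mathlib
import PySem

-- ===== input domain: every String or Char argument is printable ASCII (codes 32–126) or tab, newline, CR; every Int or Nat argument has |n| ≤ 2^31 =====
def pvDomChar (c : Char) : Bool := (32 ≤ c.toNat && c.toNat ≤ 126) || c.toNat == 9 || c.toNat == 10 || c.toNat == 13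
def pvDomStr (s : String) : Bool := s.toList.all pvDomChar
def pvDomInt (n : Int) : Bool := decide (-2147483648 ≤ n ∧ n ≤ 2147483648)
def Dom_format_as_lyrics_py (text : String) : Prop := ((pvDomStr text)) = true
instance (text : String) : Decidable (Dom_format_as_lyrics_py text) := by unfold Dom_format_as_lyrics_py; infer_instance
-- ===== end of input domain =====

-- B replaces A's two-level parse (split on "\n\n", re-split stanzas, indent, join with
-- empty-string sentinels, final strip) by one left-to-right state machine over the lines
-- of the text with an output accumulator and a pending-break flag; same return value.

-- ===== PORT A =====
def format_as_lyrics_py (text : String) : String :=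
  if text = "" then text
  else
    let estrofas := (((PySem.Str.split? text "\n\n").getD []).map PySem.Str.strip).filter
      (fun e => e ≠ "")
    let letras := estrofas.foldl (fun acc estrofa =>
      let versos := (((PySem.Str.split? estrofa "\n").getD []).map PySem.Str.strip).filter
        (fun v => v ≠ "")
      (versos.foldl (fun a verso => a ++ ["  " ++ verso]) acc) ++ [""]) []
    PySem.Str.strip (PySem.Str.join "\n" letras)

-- ===== PORT B =====
def format_as_lyrics_py_alt (text : String) : String :=
  if text = "" then text
  else
    (((PySem.Str.split? text "\n").getD []).foldl
      (fun (st : String × Bool) line =>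
        let verse := PySem.Str.strip line
        if line = "" then (st.1, true)
        else if verse ≠ "" then
          ((if st.1 = "" then verse
            else st.1 ++ (if st.2 then "\n\n" else "\n") ++ "  " ++ verse), false)
        else st)
      ("", false)).1

-- ===== PRECONDITION & SPEC =====
def Spec_format_as_lyrics_py (text : String) (out : String) : Prop := out = format_as_lyrics_py_alt text
instance (text : String) (out : String) : Decidable (Spec_format_as_lyrics_py text out) := by unfold Spec_format_as_lyrics_py; infer_instance

-- ===== CLAIM (what is proved, stated in full; the proofs are below) =====
def Claim_equal_format_as_lyrics_py : Prop := ∀ (text : String), Dom_format_as_lyrics_py text → Spec_format_as_lyrics_py text (format_as_lyrics_py text)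

-- ===== LEMMAS AND PROOFS =====

-- lines of a char list, the stripped nonempty verses of a lines list
def pvLines (s : List Char) : List (List Char) := PySem.Chars.splitOn s ['\n']

def pvLV (M : List (List Char)) : List (List Char) :=
  (M.map PySem.Chars.strip).filter (fun v => v ≠ [])

-- the stripped-nonempty verses of a stanza string, its indented verses, the stanzas of a text
def pvVerses (e : List Char) : List (List Char) :=
  ((PySem.Chars.splitOn e ['\n']).map PySem.Chars.strip).filter (fun v => v ≠ [])

def pvInd (e : List Char) : List (List Char) := (pvVerses e).map (fun l => ' ' :: ' ' :: l)

def pvEs (s : List Char) : List (List Char) :=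
  ((PySem.Chars.splitOn s ['\n', '\n']).map PySem.Chars.strip).filter (fun v => v ≠ [])

-- rendering of groups of verses: first verse bare, later verses "\n  v", later groups "\n\n  v…"
def pvInner (vs : List (List Char)) : List Char :=
  (vs.map (fun v => '\n' :: ' ' :: ' ' :: v)).flatten

def pvRend1 : List (List Char) → List Char
  | [] => []
  | v :: vs => v ++ pvInner vs

def pvRendN (g : List (List Char)) : List Char := '\n' :: '\n' :: ' ' :: ' ' :: pvRend1 g

def pvOut : List (List (List Char)) → List Char
  | [] => []
  | g :: gs => pvRend1 g ++ (gs.map pvRendN).flatten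

-- B's state machine, linearized: output contributed by the remaining lines
def pvSuffix : List (List Char) → Bool → List Char
  | [], _ => []
  | ℓ :: r, p =>
    if ℓ = [] then pvSuffix r true
    else if PySem.Chars.strip ℓ ≠ [] then
      (if p then ['\n', '\n'] else ['\n']) ++ ' ' :: ' ' :: PySem.Chars.strip ℓ ++ pvSuffix r false
    else pvSuffix r p

def pvFirst : List (List Char) → List Char
  | [] => []
  | ℓ :: r =>
    if PySem.Chars.strip ℓ = [] then pvFirst r
    else PySem.Chars.strip ℓ ++ pvSuffix r false

-- B's fold step at the char-list level
def pvStep (st : List Char × Bool) (line : List Char) : List Char × Bool :=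
  let verse := PySem.Chars.strip line
  if line = [] then (st.1, true)
  else if verse ≠ [] then
    ((if st.1 = [] then verse
      else st.1 ++ (if st.2 then ['\n', '\n'] else ['\n']) ++ ' ' :: ' ' :: verse), false)
  else st

-- ---------- generic intercalate lemmas ----------

lemma pv_ic_single {α : Type} (sep a : List α) : List.intercalate sep [a] = a := by
  simp [List.intercalate]

lemma pv_ic_cons {α : Type} (sep a : List α) (l : List (List α)) (h : l ≠ []) :
    List.intercalate sep (a :: l) = a ++ sep ++ List.intercalate sep l := by
  cases l with
  | nil => exact absurd rfl h
  | cons b l => simp [List.intercalate, List.flatten, List.append_assoc]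

lemma pv_ic_cons' {α : Type} (sep a : List α) (l : List (List α)) :
    List.intercalate sep (a :: l)
      = a ++ (if l = [] then [] else sep ++ List.intercalate sep l) := by
  cases l with
  | nil => simp [List.intercalate]
  | cons b l => rw [pv_ic_cons sep a (b :: l) (by simp), if_neg (by simp)]; simp [List.append_assoc]

lemma pv_ic_append {α : Type} (sep : List α) (x y : List (List α)) (hx : x ≠ []) (hy : y ≠ []) :
    List.intercalate sep (x ++ y)
      = List.intercalate sep x ++ sep ++ List.intercalate sep y := by
  induction x with
  | nil => exact absurd rfl hx
  | cons a x ih =>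
    cases x with
    | nil =>
      cases y with
      | nil => exact absurd rfl hy
      | cons b y =>
        rw [List.singleton_append, pv_ic_cons sep a (b :: y) (by simp), pv_ic_single]
    | cons a' x' =>
      rw [List.cons_append, pv_ic_cons sep a (a' :: x' ++ y) (by simp),
        pv_ic_cons sep a (a' :: x') (by simp), ih (by simp)]
      simp [List.append_assoc]

lemma pv_join_eq (sep : List Char) (parts : List (List Char)) :
    PySem.Chars.join sep parts = List.intercalate sep parts := rfl

-- ---------- splitOn unfolding ----------

lemma pv_go_shape (sep : List Char) :
    ∀ (fuel : Nat) (l cur : List Char) (acc : List (List Char)),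
      ∃ t ps, PySem.Chars.splitOn.go sep fuel l cur acc = acc.reverse ++ (cur.reverse ++ t) :: ps := by
  intro fuel
  induction fuel with
  | zero => intro l cur acc; exact ⟨l, [], by simp [PySem.Chars.splitOn.go]⟩
  | succ fuel ih =>
    intro l cur acc
    cases l with
    | nil => exact ⟨[], [], by simp [PySem.Chars.splitOn.go]⟩
    | cons c rest =>
      by_cases hp : sep.isPrefixOf (c :: rest) = true
      · obtain ⟨t, ps, h⟩ := ih (List.drop sep.length (c :: rest)) [] (cur.reverse :: acc)
        exact ⟨[], t :: ps, by simp [PySem.Chars.splitOn.go, hp, h]⟩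
      · obtain ⟨t, ps, h⟩ := ih rest (c :: cur) acc
        exact ⟨c :: t, ps, by simp [PySem.Chars.splitOn.go, hp, h]⟩

lemma pv_splitOn_ne_nil (s sep : List Char) : PySem.Chars.splitOn s sep ≠ [] := by
  obtain ⟨t, ps, h⟩ := pv_go_shape sep (s.length + 1) s [] []
  unfold PySem.Chars.splitOn
  rw [h]; simp

lemma pv_go_acc (sep : List Char) :
    ∀ (fuel : Nat) (l cur : List Char) (acc : List (List Char)),
      PySem.Chars.splitOn.go sep fuel l cur acc
        = acc.reverse ++ (PySem.Chars.splitOn.go sep fuel l [] []).modifyHead (cur.reverse ++ ·) := by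
  intro fuel
  induction fuel with
  | zero =>
    intro l cur acc
    simp [PySem.Chars.splitOn.go, List.modifyHead]
  | succ fuel ih =>
    intro l cur acc
    cases l with
    | nil => simp [PySem.Chars.splitOn.go, List.modifyHead]
    | cons c rest =>
      by_cases hp : sep.isPrefixOf (c :: rest) = true
      · simp only [PySem.Chars.splitOn.go, hp, if_true, List.reverse_nil]
        rw [ih (List.drop sep.length (c :: rest)) [] (cur.reverse :: acc),
          ih (List.drop sep.length (c :: rest)) [] ([] :: [])]
        cases hgo : PySem.Chars.splitOn.go sep fuel (List.drop sep.length (c :: rest)) [] [] with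
        | nil => simp [List.modifyHead]
        | cons a b => simp [List.modifyHead]
      · simp only [PySem.Chars.splitOn.go, hp, Bool.false_eq_true, if_false]
        rw [ih rest (c :: cur) acc, ih rest [c] []]
        cases hgo : PySem.Chars.splitOn.go sep fuel rest [] [] with
        | nil => simp [List.modifyHead]
        | cons a b => simp [List.modifyHead]

lemma pv_go_fuel (sep : List Char) (hsep : sep ≠ []) :
    ∀ (n : Nat) (l : List Char), l.length ≤ n →
      ∀ (f : Nat), l.length ≤ f →
        PySem.Chars.splitOn.go sep f l [] [] = PySem.Chars.splitOn.go sep (l.length + 1) l [] [] := by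
  have hsl : 0 < sep.length := List.length_pos_iff.mpr hsep
  intro n
  induction n with
  | zero =>
    intro l hln f _
    have : l = [] := List.eq_nil_of_length_eq_zero (Nat.le_zero.mp hln)
    subst this
    cases f <;> simp [PySem.Chars.splitOn.go]
  | succ n ih =>
    intro l hln f hlf
    cases l with
    | nil => cases f <;> simp [PySem.Chars.splitOn.go]
    | cons c rest =>
      simp only [List.length_cons] at hln hlf
      obtain ⟨f', rfl⟩ : ∃ f', f = f' + 1 := ⟨f - 1, by omega⟩
      by_cases hp : sep.isPrefixOf (c :: rest) = true
      · simp only [List.length_cons, PySem.Chars.splitOn.go, hp, if_true, List.reverse_nil]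
        rw [pv_go_acc sep f' (List.drop sep.length (c :: rest)) [] [[]],
          pv_go_acc sep (rest.length + 1) (List.drop sep.length (c :: rest)) [] [[]]]
        have hd : (List.drop sep.length (c :: rest)).length ≤ n := by
          simp [List.length_drop]; omega
        rw [ih _ hd f' (by simp [List.length_drop]; omega),
          ih _ hd (rest.length + 1) (by simp [List.length_drop])]
      · simp only [List.length_cons, PySem.Chars.splitOn.go, hp, Bool.false_eq_true, if_false]
        rw [pv_go_acc sep f' rest [c] [], pv_go_acc sep (rest.length + 1) rest [c] []]
        rw [ih rest (by omega) f' (by omega), ih rest (by omega) (rest.length + 1) (by omega)]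

lemma pv_splitOn_nil (sep : List Char) : PySem.Chars.splitOn [] sep = [[]] := by
  rfl

lemma pv_splitOn_cons_pos (sep : List Char) (hsep : sep ≠ []) (c : Char) (l : List Char)
    (h : sep.isPrefixOf (c :: l) = true) :
    PySem.Chars.splitOn (c :: l) sep
      = [] :: PySem.Chars.splitOn (List.drop sep.length (c :: l)) sep := by
  have hsl : 0 < sep.length := List.length_pos_iff.mpr hsep
  show PySem.Chars.splitOn.go sep ((c :: l).length + 1) (c :: l) [] [] = _
  simp only [List.length_cons, PySem.Chars.splitOn.go, h, if_true, List.reverse_nil]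
  rw [pv_go_acc sep (l.length + 1) (List.drop sep.length (c :: l)) [] [[]]]
  rw [pv_go_fuel sep hsep (List.drop sep.length (c :: l)).length _ le_rfl (l.length + 1)
    (by simp [List.length_drop])]
  show _ ++ (PySem.Chars.splitOn (List.drop sep.length (c :: l)) sep).modifyHead _ = _
  cases hgo : PySem.Chars.splitOn (List.drop sep.length (c :: l)) sep with
  | nil => exact absurd hgo (pv_splitOn_ne_nil _ _)
  | cons a b => simp [List.modifyHead]

lemma pv_splitOn_cons_neg (sep : List Char) (c : Char) (l : List Char)
    (h : ¬ sep.isPrefixOf (c :: l) = true) :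
    PySem.Chars.splitOn (c :: l) sep = (PySem.Chars.splitOn l sep).modifyHead (c :: ·) := by
  show PySem.Chars.splitOn.go sep ((c :: l).length + 1) (c :: l) [] [] = _
  simp only [List.length_cons, PySem.Chars.splitOn.go, h, Bool.false_eq_true, if_false]
  rw [pv_go_acc sep (l.length + 1) l [c] []]
  cases hgo : PySem.Chars.splitOn.go sep (l.length + 1) l [] [] with
  | nil => simp [List.modifyHead, PySem.Chars.splitOn, hgo]
  | cons a b => simp [List.modifyHead, PySem.Chars.splitOn, hgo]

lemma pv_splitOn_intercalate (sep : List Char) (hsep : sep ≠ []) :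
    ∀ s : List Char, List.intercalate sep (PySem.Chars.splitOn s sep) = s := by
  have hsl : 0 < sep.length := List.length_pos_iff.mpr hsep
  have H : ∀ (n : Nat) (s : List Char), s.length ≤ n →
      List.intercalate sep (PySem.Chars.splitOn s sep) = s := by
    intro n
    induction n with
    | zero =>
      intro s hs
      have : s = [] := List.eq_nil_of_length_eq_zero (Nat.le_zero.mp hs)
      subst this
      rw [pv_splitOn_nil, pv_ic_single]
    | succ n ih =>
      intro s hs
      cases s with
      | nil => rw [pv_splitOn_nil, pv_ic_single]
      | cons c l =>
        by_cases hp : sep.isPrefixOf (c :: l) = true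
        · rw [pv_splitOn_cons_pos sep hsep c l hp]
          obtain ⟨t, ht⟩ := List.isPrefixOf_iff_prefix.mp hp
          have hdrop : List.drop sep.length (c :: l) = t := by
            rw [← ht, List.drop_left]
          rw [hdrop, pv_ic_cons sep [] _ (pv_splitOn_ne_nil t sep), List.nil_append,
            ih t (by simp at hs ⊢; have := congrArg List.length ht; simp at this; omega)]
          exact ht
        · rw [pv_splitOn_cons_neg sep c l hp]
          cases hsp : PySem.Chars.splitOn l sep with
          | nil => exact absurd hsp (pv_splitOn_ne_nil l sep)
          | cons h t =>
            have := ih l (by simp at hs; omega)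
            rw [hsp, pv_ic_cons'] at this
            simp only [List.modifyHead]
            rw [pv_ic_cons', List.cons_append, this]
  intro s
  exact H s.length s le_rfl

lemma pv_splitOn_not_infix (sep : List Char) (hsep : sep ≠ []) :
    ∀ (s p : List Char), p ∈ PySem.Chars.splitOn s sep → ¬ sep <:+: p := by
  have hsl : 0 < sep.length := List.length_pos_iff.mpr hsep
  have H : ∀ (n : Nat) (s : List Char), s.length ≤ n →
      ∀ p ∈ PySem.Chars.splitOn s sep, ¬ sep <:+: p := by
    intro n
    induction n with
    | zero =>
      intro s hs p hp hinf
      have : s = [] := List.eq_nil_of_length_eq_zero (Nat.le_zero.mp hs)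
      subst this
      rw [pv_splitOn_nil] at hp
      simp at hp
      subst hp
      exact hsep (List.eq_nil_of_infix_nil hinf)
    | succ n ih =>
      intro s hs p hp hinf
      cases s with
      | nil =>
        rw [pv_splitOn_nil] at hp
        simp at hp
        subst hp
        exact hsep (List.eq_nil_of_infix_nil hinf)
      | cons c l =>
        by_cases hpre : sep.isPrefixOf (c :: l) = true
        · rw [pv_splitOn_cons_pos sep hsep c l hpre] at hp
          rcases List.mem_cons.mp hp with rfl | hp2
          · exact hsep (List.eq_nil_of_infix_nil hinf)
          · exact ih _ (by simp [List.length_drop] at hs ⊢; omega) p hp2 hinf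
        · rw [pv_splitOn_cons_neg sep c l hpre] at hp
          cases hsp : PySem.Chars.splitOn l sep with
          | nil => exact absurd hsp (pv_splitOn_ne_nil l sep)
          | cons h t =>
            rw [hsp] at hp
            simp only [List.modifyHead] at hp
            rcases List.mem_cons.mp hp with rfl | hp2
            · rcases List.infix_cons_iff.mp hinf with hpr | hinf2
              · have hpl : h <+: l := by
                  have hl := pv_splitOn_intercalate sep hsep l
                  rw [hsp, pv_ic_cons'] at hl
                  exact ⟨_, hl⟩
                obtain ⟨u, hu⟩ := hpl
                have : sep <+: c :: l := hpr.trans ⟨u, by rw [List.cons_append, hu]⟩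
                exact absurd (List.isPrefixOf_iff_prefix.mpr this) hpre
              · exact ih l (by simp at hs; omega) h (hsp ▸ List.mem_cons_self ..) hinf2
            · exact ih l (by simp at hs; omega) p (hsp ▸ List.mem_cons_of_mem h hp2) hinf
  intro s
  exact H s.length s le_rfl

lemma pv_splitOn_mem_mem (sep : List Char) (hsep : sep ≠ []) :
    ∀ (s p : List Char), p ∈ PySem.Chars.splitOn s sep → ∀ c ∈ p, c ∈ s := by
  have hsl : 0 < sep.length := List.length_pos_iff.mpr hsep
  have H : ∀ (n : Nat) (s : List Char), s.length ≤ n →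
      ∀ p ∈ PySem.Chars.splitOn s sep, ∀ c ∈ p, c ∈ s := by
    intro n
    induction n with
    | zero =>
      intro s hs p hp c hc
      have : s = [] := List.eq_nil_of_length_eq_zero (Nat.le_zero.mp hs)
      subst this
      rw [pv_splitOn_nil] at hp
      simp at hp
      subst hp
      simp at hc
    | succ n ih =>
      intro s hs p hp c hc
      cases s with
      | nil =>
        rw [pv_splitOn_nil] at hp
        simp at hp
        subst hp
        simp at hc
      | cons a l =>
        by_cases hpre : sep.isPrefixOf (a :: l) = true
        · rw [pv_splitOn_cons_pos sep hsep a l hpre] at hp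
          rcases List.mem_cons.mp hp with rfl | hp2
          · simp at hc
          · exact List.drop_subset _ _
              (ih _ (by simp [List.length_drop] at hs ⊢; omega) p hp2 c hc)
        · rw [pv_splitOn_cons_neg sep a l hpre] at hp
          cases hsp : PySem.Chars.splitOn l sep with
          | nil => exact absurd hsp (pv_splitOn_ne_nil l sep)
          | cons h t =>
            rw [hsp] at hp
            simp only [List.modifyHead] at hp
            rcases List.mem_cons.mp hp with rfl | hp2
            · rcases List.mem_cons.mp hc with rfl | hc2
              · simp
              · exact List.mem_cons_of_mem a
                  (ih l (by simp at hs; omega) h (hsp ▸ List.mem_cons_self ..) c hc2)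
            · exact List.mem_cons_of_mem a
                (ih l (by simp at hs; omega) p (hsp ▸ List.mem_cons_of_mem h hp2) c hc)
  intro s
  exact H s.length s le_rfl

-- lines unfolding
lemma pv_lines_nil : pvLines [] = [[]] := rfl

lemma pv_lines_cons_nl (r : List Char) : pvLines ('\n' :: r) = [] :: pvLines r := by
  unfold pvLines
  rw [pv_splitOn_cons_pos ['\n'] (by simp) '\n' r (by simp [List.isPrefixOf])]
  rfl

lemma pv_lines_cons (c : Char) (r : List Char) (h : c ≠ '\n') :
    pvLines (c :: r) = (pvLines r).modifyHead (c :: ·) := by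
  unfold pvLines
  rw [pv_splitOn_cons_neg ['\n'] c r (by simp [List.isPrefixOf]; exact fun hn => absurd hn.symm h)]

lemma pv_lines_ne_nil (s : List Char) : pvLines s ≠ [] := pv_splitOn_ne_nil s ['\n']

-- the key split-composition law: lines of s = lines of the "\n\n"-pieces, separated by one empty line
lemma pv_lines_pieces :
    ∀ s : List Char,
      List.intercalate [[]] ((PySem.Chars.splitOn s ['\n', '\n']).map pvLines) = pvLines s := by
  have hsep : (['\n', '\n'] : List Char) ≠ [] := by simp
  have H : ∀ (n : Nat) (s : List Char), s.length ≤ n →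
      List.intercalate [[]] ((PySem.Chars.splitOn s ['\n', '\n']).map pvLines) = pvLines s := by
    intro n
    induction n with
    | zero =>
      intro s hs
      have : s = [] := List.eq_nil_of_length_eq_zero (Nat.le_zero.mp hs)
      subst this
      rw [pv_splitOn_nil]
      simp [pv_ic_single]
    | succ n ih =>
      intro s hs
      cases s with
      | nil =>
        rw [pv_splitOn_nil]
        simp [pv_ic_single]
      | cons c l =>
        by_cases hp : (['\n', '\n'] : List Char).isPrefixOf (c :: l) = true
        · obtain ⟨t, ht⟩ := List.isPrefixOf_iff_prefix.mp hp
          have hcl : c :: l = '\n' :: '\n' :: t := ht.symm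
          rw [pv_splitOn_cons_pos _ hsep c l hp]
          have hdrop : List.drop (['\n', '\n'] : List Char).length (c :: l) = t := by
            rw [← ht]
            exact List.drop_left
          rw [hdrop, List.map_cons,
            pv_ic_cons [[]] (pvLines []) _ (by
              simp only [ne_eq, List.map_eq_nil_iff]
              exact pv_splitOn_ne_nil t _),
            pv_lines_nil, hcl, pv_lines_cons_nl, pv_lines_cons_nl,
            ih t (by
              have := congrArg List.length hcl
              simp at this hs
              omega)]
          rfl
        · rw [pv_splitOn_cons_neg _ c l hp]
          cases hsp : PySem.Chars.splitOn l ['\n', '\n'] with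
          | nil => exact absurd hsp (pv_splitOn_ne_nil l _)
          | cons h t =>
            have ihl := ih l (by simp at hs; omega)
            rw [hsp] at ihl
            simp only [List.modifyHead, List.map_cons]
            rw [List.map_cons, pv_ic_cons'] at ihl
            rw [pv_ic_cons']
            by_cases hc : c = '\n'
            · subst hc
              rw [pv_lines_cons_nl, pv_lines_cons_nl, ← ihl]
              rfl
            · rw [pv_lines_cons c h hc, pv_lines_cons c l hc, ← ihl]
              cases hlh : pvLines h with
              | nil => exact absurd hlh (pv_lines_ne_nil h)
              | cons h0 h' => simp [List.modifyHead]
  intro s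
  exact H s.length s le_rfl

-- ---------- whitespace / strip lemmas ----------

lemma pv_dropWhile_head {α : Type} {p : α → Bool} :
    ∀ (l : List α) (c : α) (z : List α), List.dropWhile p l = c :: z → p c = false := by
  intro l
  induction l with
  | nil => intro c z h; cases h
  | cons a l ih =>
    intro c z h
    by_cases hp : p a = true
    · rw [List.dropWhile_cons_of_pos hp] at h
      exact ih c z h
    · rw [List.dropWhile_cons_of_neg hp] at h
      cases h
      simpa using hp

lemma pv_strip_all_space (cs : List Char) (h : PySem.Chars.strip cs = []) :
    ∀ c ∈ cs, PySem.Chars.isspace c = true := by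
  unfold PySem.Chars.strip PySem.Chars.lstrip PySem.Chars.rstrip at h
  rw [List.reverse_eq_nil_iff, List.dropWhile_eq_nil_iff] at h
  intro c hc
  rcases List.mem_append.mp ((List.takeWhile_append_dropWhile (p := PySem.Chars.isspace)
      (l := cs)) ▸ hc) with h1 | h2
  · exact List.mem_takeWhile_imp h1
  · exact h c (by simpa using h2)

lemma pv_all_space_strip (cs : List Char) (h : ∀ c ∈ cs, PySem.Chars.isspace c = true) :
    PySem.Chars.strip cs = [] := by
  unfold PySem.Chars.strip PySem.Chars.lstrip PySem.Chars.rstrip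
  have h1 : List.dropWhile PySem.Chars.isspace cs = [] := by
    rw [List.dropWhile_eq_nil_iff]
    intro x hx
    exact h x hx
  rw [h1]
  rfl

lemma pv_strip_head_not_space (cs : List Char) (h : PySem.Chars.strip cs ≠ []) :
    ∃ c t, PySem.Chars.strip cs = c :: t ∧ PySem.Chars.isspace c = false := by
  have hpre : PySem.Chars.strip cs <+: PySem.Chars.lstrip cs := by
    unfold PySem.Chars.strip PySem.Chars.rstrip
    have := List.dropWhile_suffix (l := (PySem.Chars.lstrip cs).reverse) PySem.Chars.isspace
    have := List.reverse_prefix.mpr this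
    simpa using this
  cases hs : PySem.Chars.strip cs with
  | nil => exact absurd hs h
  | cons c t =>
    refine ⟨c, t, rfl, ?_⟩
    rw [hs] at hpre
    obtain ⟨r, hr⟩ := hpre
    have hl : List.dropWhile PySem.Chars.isspace cs = c :: (t ++ r) := by
      simpa [PySem.Chars.lstrip] using hr.symm
    exact pv_dropWhile_head cs c (t ++ r) hl

lemma pv_strip_last_not_space (cs : List Char) (h : PySem.Chars.strip cs ≠ []) :
    ∃ y d, PySem.Chars.strip cs = y ++ [d] ∧ PySem.Chars.isspace d = false := by
  unfold PySem.Chars.strip PySem.Chars.rstrip at h ⊢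
  cases hX : List.dropWhile PySem.Chars.isspace (PySem.Chars.lstrip cs).reverse with
  | nil => exact absurd (by rw [hX]; rfl) h
  | cons d z =>
    refine ⟨z.reverse, d, ?_, pv_dropWhile_head _ d z hX⟩
    simp

lemma pv_lstrip_fix (c : Char) (t : List Char) (h : PySem.Chars.isspace c = false) :
    PySem.Chars.lstrip (c :: t) = c :: t := by
  unfold PySem.Chars.lstrip
  rw [List.dropWhile_cons_of_neg (by simp [h])]

lemma pv_rstrip_fix (y : List Char) (d : Char) (h : PySem.Chars.isspace d = false) :
    PySem.Chars.rstrip (y ++ [d]) = y ++ [d] := by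
  unfold PySem.Chars.rstrip
  rw [List.reverse_append]
  simp only [List.reverse_cons, List.reverse_nil, List.nil_append, List.singleton_append]
  rw [List.dropWhile_cons_of_neg (by simp [h])]
  simp

lemma pv_strip_cons_ws (c : Char) (x : List Char) (h : PySem.Chars.isspace c = true) :
    PySem.Chars.strip (c :: x) = PySem.Chars.strip x := by
  unfold PySem.Chars.strip PySem.Chars.lstrip
  rw [List.dropWhile_cons_of_pos (by simp [h])]

lemma pv_strip_snoc_ws (c : Char) (x : List Char) (h : PySem.Chars.isspace c = true) :
    PySem.Chars.strip (x ++ [c]) = PySem.Chars.strip x := by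
  have hr : ∀ z : List Char, PySem.Chars.rstrip (z ++ [c]) = PySem.Chars.rstrip z := by
    intro z
    unfold PySem.Chars.rstrip
    rw [List.reverse_append]
    simp only [List.reverse_cons, List.reverse_nil, List.nil_append, List.singleton_append]
    rw [List.dropWhile_cons_of_pos (by simp [h])]
  by_cases hall : ∀ a ∈ x, PySem.Chars.isspace a = true
  · rw [pv_all_space_strip x hall, pv_all_space_strip (x ++ [c]) (by
      intro a ha
      rcases List.mem_append.mp ha with h1 | h2
      · exact hall a h1
      · simp at h2; subst h2; exact h)]
  · have hne : PySem.Chars.lstrip x ≠ [] := by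
      unfold PySem.Chars.lstrip
      rw [ne_eq, List.dropWhile_eq_nil_iff]
      push_neg
      push_neg at hall
      obtain ⟨a, ha, hwa⟩ := hall
      exact ⟨a, ha, by simpa using hwa⟩
    have hls : PySem.Chars.lstrip (x ++ [c]) = PySem.Chars.lstrip x ++ [c] := by
      unfold PySem.Chars.lstrip at hne ⊢
      rw [List.dropWhile_append]
      rw [if_neg (by simpa [List.isEmpty_iff] using hne)]
    unfold PySem.Chars.strip
    rw [hls, hr]


lemma pv_strip_nil : PySem.Chars.strip [] = [] := rfl

lemma pv_rstrip_decomp (x : List Char) :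
    ∃ w, x = PySem.Chars.rstrip x ++ w ∧ ∀ c ∈ w, PySem.Chars.isspace c = true := by
  refine ⟨(List.takeWhile PySem.Chars.isspace x.reverse).reverse, ?_, ?_⟩
  · unfold PySem.Chars.rstrip
    rw [← List.reverse_append, ← List.reverse_reverse x]
    rw [List.reverse_inj, List.reverse_reverse]
    exact (List.takeWhile_append_dropWhile ..).symm
  · intro c hc
    rw [List.mem_reverse] at hc
    exact List.mem_takeWhile_imp hc

-- ---------- verses are invariant under stanza strip ----------

lemma pv_lv_cons_ws (c : Char) (x : List Char) (h : PySem.Chars.isspace c = true) :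
    pvLV (pvLines (c :: x)) = pvLV (pvLines x) := by
  by_cases hc : c = '\n'
  · subst hc
    rw [pv_lines_cons_nl]
    unfold pvLV
    rw [List.map_cons, pv_strip_nil]
    simp
  · rw [pv_lines_cons c x hc]
    cases hlx : pvLines x with
    | nil => exact absurd hlx (pv_lines_ne_nil x)
    | cons h0 t =>
      simp only [List.modifyHead]
      unfold pvLV
      rw [List.map_cons, List.map_cons, pv_strip_cons_ws c h0 h]

lemma pv_lv_lstrip (x : List Char) :
    pvLV (pvLines (PySem.Chars.lstrip x)) = pvLV (pvLines x) := by
  induction x with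
  | nil => rfl
  | cons a x ih =>
    by_cases ha : PySem.Chars.isspace a = true
    · have h1 : PySem.Chars.lstrip (a :: x) = PySem.Chars.lstrip x := by
        unfold PySem.Chars.lstrip
        rw [List.dropWhile_cons_of_pos (by simp [ha])]
      rw [h1, ih, ← pv_lv_cons_ws a x ha]
    · rw [pv_lstrip_fix a x (by simpa using ha)]

lemma pv_lines_snoc (x : List Char) (c : Char) (h : c ≠ '\n') :
    ∀ M ℓ, pvLines x = M ++ [ℓ] → pvLines (x ++ [c]) = M ++ [ℓ ++ [c]] := by
  induction x with
  | nil =>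
    intro M ℓ hM
    rw [pv_lines_nil] at hM
    cases M with
    | nil =>
      simp at hM
      subst hM
      rw [List.nil_append, List.nil_append, pv_lines_cons c [] h]
      rfl
    | cons m M' => simp at hM
  | cons a x ih =>
    intro M ℓ hM
    by_cases ha : a = '\n'
    · subst ha
      rw [pv_lines_cons_nl] at hM
      cases M with
      | nil =>
        simp at hM
        exact absurd hM.2.symm (by simpa using pv_lines_ne_nil x)
      | cons m M' =>
        simp only [List.cons_append, List.cons.injEq] at hM
        obtain ⟨rfl, hM'⟩ := hM
        rw [List.cons_append, pv_lines_cons_nl, ih M' ℓ hM']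
        rfl
    · rw [pv_lines_cons a x ha] at hM
      cases hlx : pvLines x with
      | nil => exact absurd hlx (pv_lines_ne_nil x)
      | cons h0 t =>
        rw [hlx] at hM
        simp only [List.modifyHead] at hM
        cases M with
        | nil =>
          simp only [List.nil_append, List.cons.injEq] at hM
          obtain ⟨h1, h2⟩ := hM
          rw [List.cons_append, pv_lines_cons a (x ++ [c]) ha,
            ih [] h0 (by rw [hlx, h2]; rfl)]
          simp [List.modifyHead, ← h1]
        | cons m M' =>
          simp only [List.cons_append, List.cons.injEq] at hM
          obtain ⟨rfl, hM'⟩ := hM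
          rw [List.cons_append, pv_lines_cons a (x ++ [c]) ha,
            ih (h0 :: M') ℓ (by rw [hlx, hM']; rfl)]
          simp [List.modifyHead]

lemma pv_lines_snoc_nl (x : List Char) : pvLines (x ++ ['\n']) = pvLines x ++ [[]] := by
  induction x with
  | nil => rfl
  | cons a x ih =>
    by_cases ha : a = '\n'
    · subst ha
      rw [List.cons_append, pv_lines_cons_nl, pv_lines_cons_nl, ih]
      rfl
    · rw [List.cons_append, pv_lines_cons a (x ++ ['\n']) ha, pv_lines_cons a x ha, ih]
      cases hlx : pvLines x with
      | nil => exact absurd hlx (pv_lines_ne_nil x)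
      | cons h0 t => simp [List.modifyHead]

lemma pv_lv_append (M N : List (List Char)) : pvLV (M ++ N) = pvLV M ++ pvLV N := by
  unfold pvLV
  simp

lemma pv_lv_snoc_ws (c : Char) (x : List Char) (h : PySem.Chars.isspace c = true) :
    pvLV (pvLines (x ++ [c])) = pvLV (pvLines x) := by
  by_cases hc : c = '\n'
  · subst hc
    rw [pv_lines_snoc_nl, pv_lv_append]
    simp [pvLV, pv_strip_nil]
  · rcases List.eq_nil_or_concat (pvLines x) with hn | ⟨M, ℓ, hMl⟩
    · exact absurd hn (pv_lines_ne_nil x)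
    · rw [List.concat_eq_append] at hMl
      rw [pv_lines_snoc x c hc M ℓ hMl, hMl, pv_lv_append, pv_lv_append]
      have h1 := pv_strip_snoc_ws c ℓ h
      simp [pvLV, h1]

lemma pv_lv_ws_suffix :
    ∀ (w : List Char), (∀ c ∈ w, PySem.Chars.isspace c = true) →
      ∀ x, pvLV (pvLines (x ++ w)) = pvLV (pvLines x) := by
  intro w
  induction w with
  | nil => intro _ x; rw [List.append_nil]
  | cons c w ih =>
    intro hws x
    have h1 : x ++ c :: w = (x ++ [c]) ++ w := by simp
    rw [h1, ih (fun a ha => hws a (List.mem_cons_of_mem c ha)) (x ++ [c]),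
      pv_lv_snoc_ws c x (hws c (by simp))]

lemma pv_lv_strip (p : List Char) :
    pvLV (pvLines (PySem.Chars.strip p)) = pvLV (pvLines p) := by
  obtain ⟨w, hw, hws⟩ := pv_rstrip_decomp (PySem.Chars.lstrip p)
  calc pvLV (pvLines (PySem.Chars.strip p))
      = pvLV (pvLines (PySem.Chars.rstrip (PySem.Chars.lstrip p))) := rfl
    _ = pvLV (pvLines (PySem.Chars.rstrip (PySem.Chars.lstrip p) ++ w)) :=
        (pv_lv_ws_suffix w hws _).symm
    _ = pvLV (pvLines (PySem.Chars.lstrip p)) := by rw [← hw]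
    _ = pvLV (pvLines p) := pv_lv_lstrip p

lemma pv_verses_of_strip (p : List Char) (h : PySem.Chars.strip p ≠ []) :
    pvVerses (PySem.Chars.strip p) ≠ [] := by
  obtain ⟨c, t, he, hc⟩ := pv_strip_head_not_space p h
  have hcn : c ≠ '\n' := by
    intro hcn; rw [hcn] at hc; simp [PySem.Chars.isspace] at hc
  unfold pvVerses
  rw [he]
  rw [show PySem.Chars.splitOn (c :: t) ['\n'] = pvLines (c :: t) from rfl,
    pv_lines_cons c t hcn]
  cases hlt : pvLines t with
  | nil => exact absurd hlt (pv_lines_ne_nil t)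
  | cons h0 t0 =>
    simp only [List.modifyHead, List.map_cons]
    have hne : PySem.Chars.strip (c :: h0) ≠ [] := by
      intro hnil
      have := pv_strip_all_space _ hnil c (by simp)
      rw [this] at hc
      cases hc
    simp [hne]

lemma pv_strip_nil_verses (p : List Char) (h : PySem.Chars.strip p = []) :
    pvLV (pvLines p) = [] := by
  unfold pvLV
  rw [List.filter_eq_nil_iff]
  intro v hv
  rw [List.mem_map] at hv
  obtain ⟨ℓ, hℓ, rfl⟩ := hv
  have hall := pv_strip_all_space p h
  have hws : ∀ ch ∈ ℓ, PySem.Chars.isspace ch = true :=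
    fun ch hch => hall ch (pv_splitOn_mem_mem ['\n'] (by simp) p ℓ hℓ ch hch)
  simp [pv_all_space_strip ℓ hws]

-- ---------- piece shape (no interior empty line) ----------

lemma pv_piece_shape (p : List Char) (h : ¬ ['\n', '\n'] <:+: p) :
    ∀ x y, pvLines p = x ++ [] :: y → x = [] ∨ y = [] := by
  intro x y hxy
  by_contra hcon
  rw [not_or] at hcon
  obtain ⟨hx, hy⟩ := hcon
  apply h
  have hid := pv_splitOn_intercalate ['\n'] (by simp) p
  rw [show PySem.Chars.splitOn p ['\n'] = pvLines p from rfl, hxy,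
    pv_ic_append ['\n'] x ([] :: y) hx (by simp),
    pv_ic_cons ['\n'] [] y hy] at hid
  exact ⟨List.intercalate ['\n'] x, List.intercalate ['\n'] y, by rw [← hid]; simp⟩

-- ---------- pvSuffix / pvFirst on structured line lists ----------

lemma pv_lv_unkept (M : List (List Char)) (h : ∀ ℓ ∈ M, PySem.Chars.strip ℓ = []) :
    pvLV M = [] := by
  unfold pvLV
  rw [List.filter_eq_nil_iff]
  intro v hv
  rw [List.mem_map] at hv
  obtain ⟨ℓ, hℓ, rfl⟩ := hv
  simp [h ℓ hℓ]

lemma pv_lv_nil_unkept (M : List (List Char)) (h : pvLV M = []) :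
    ∀ ℓ ∈ M, PySem.Chars.strip ℓ = [] := by
  intro ℓ hℓ
  unfold pvLV at h
  rw [List.filter_eq_nil_iff] at h
  have := h (PySem.Chars.strip ℓ) (List.mem_map_of_mem hℓ)
  simpa using this

lemma pv_suffix_unkept (M : List (List Char)) :
    (∀ ℓ ∈ M, PySem.Chars.strip ℓ = []) → ∀ p, pvSuffix M p = [] := by
  induction M with
  | nil => intro _ p; rfl
  | cons ℓ r ih =>
    intro h p
    have hs : PySem.Chars.strip ℓ = [] := h ℓ (by simp)
    have ih' := ih (fun a ha => h a (List.mem_cons_of_mem ℓ ha))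
    by_cases h1 : ℓ = []
    · simp only [pvSuffix]
      rw [if_pos h1]
      exact ih' true
    · simp only [pvSuffix]
      rw [if_neg h1, if_neg (by simp [hs])]
      exact ih' p

lemma pv_suffix_unkept_sep (M N : List (List Char)) :
    (∀ ℓ ∈ M, PySem.Chars.strip ℓ = []) → ∀ p, pvSuffix (M ++ [] :: N) p = pvSuffix N true := by
  induction M with
  | nil =>
    intro _ p
    rw [List.nil_append]
    simp only [pvSuffix]
    rw [if_pos trivial]
  | cons ℓ r ih =>
    intro h p
    have hs : PySem.Chars.strip ℓ = [] := h ℓ (by simp)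
    have ih' := ih (fun a ha => h a (List.mem_cons_of_mem ℓ ha))
    rw [List.cons_append]
    by_cases h1 : ℓ = []
    · simp only [pvSuffix]
      rw [if_pos h1]
      exact ih' true
    · simp only [pvSuffix]
      rw [if_neg h1, if_neg (by simp [hs])]
      exact ih' p

lemma pv_first_unkept (M : List (List Char)) :
    (∀ ℓ ∈ M, PySem.Chars.strip ℓ = []) → pvFirst M = [] := by
  induction M with
  | nil => intro _; rfl
  | cons ℓ r ih =>
    intro h
    simp only [pvFirst]
    rw [if_pos (h ℓ (by simp))]
    exact ih (fun a ha => h a (List.mem_cons_of_mem ℓ ha))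

lemma pv_first_unkept_sep (M N : List (List Char)) :
    (∀ ℓ ∈ M, PySem.Chars.strip ℓ = []) → pvFirst (M ++ [] :: N) = pvFirst N := by
  induction M with
  | nil =>
    intro _
    rw [List.nil_append]
    simp only [pvFirst]
    rw [if_pos pv_strip_nil]
  | cons ℓ r ih =>
    intro h
    rw [List.cons_append]
    simp only [pvFirst]
    rw [if_pos (h ℓ (by simp))]
    exact ih (fun a ha => h a (List.mem_cons_of_mem ℓ ha))

-- tail-shape: after any empty line of r, no kept line follows
def pvTailShape (r : List (List Char)) : Prop :=
  ∀ x y, r = x ++ [] :: y → ∀ ℓ ∈ y, PySem.Chars.strip ℓ = []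

def pvShape (M : List (List Char)) : Prop :=
  ∀ x y, M = x ++ [] :: y → x = [] ∨ y = []

lemma pv_tailshape_tail (ℓ : List Char) (r : List (List Char)) (h : pvTailShape (ℓ :: r)) :
    pvTailShape r := by
  intro x y hxy a ha
  exact h (ℓ :: x) y (by simp [hxy]) a ha

lemma pv_shape_tail (ℓ : List Char) (r : List (List Char)) (h : pvShape (ℓ :: r)) :
    pvShape r := by
  intro x y hxy
  rcases h (ℓ :: x) y (by simp [hxy]) with h1 | h2
  · exact absurd h1 (by simp)
  · exact Or.inr h2

lemma pv_shape_tailshape (ℓ : List Char) (r : List (List Char)) (h : pvShape (ℓ :: r)) :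
    pvTailShape r := by
  intro x y hxy a ha
  rcases h (ℓ :: x) y (by simp [hxy]) with h1 | h2
  · exact absurd h1 (by simp)
  · rw [h2] at ha
    simp at ha

lemma pv_suffix_run (r : List (List Char)) :
    pvTailShape r →
      (∀ N, pvSuffix (r ++ [] :: N) false = pvInner (pvLV r) ++ pvSuffix N true) ∧
        pvSuffix r false = pvInner (pvLV r) := by
  induction r with
  | nil =>
    intro _
    constructor
    · intro N
      rw [List.nil_append]
      simp only [pvSuffix]
      rw [if_pos trivial]
      simp [pvLV, pvInner]
    · rfl
  | cons ℓ r ih =>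
    intro hts
    have hts' := pv_tailshape_tail ℓ r hts
    by_cases h0 : ℓ = []
    · subst h0
      have hunk : ∀ a ∈ r, PySem.Chars.strip a = [] := fun a ha => hts [] r rfl a ha
      have hLV : pvLV ([] :: r) = [] :=
        pv_lv_unkept _ (by
          intro a ha
          rcases List.mem_cons.mp ha with rfl | h'
          · rfl
          · exact hunk a h')
      constructor
      · intro N
        rw [List.cons_append]
        simp only [pvSuffix]
        rw [if_pos trivial, pv_suffix_unkept_sep r N hunk true, hLV]
        simp [pvInner]
      · simp only [pvSuffix]
        rw [if_pos trivial, pv_suffix_unkept r hunk true, hLV]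
        rfl
    · by_cases h1 : PySem.Chars.strip ℓ = []
      · have hLV : pvLV (ℓ :: r) = pvLV r := by simp [pvLV, h1]
        constructor
        · intro N
          rw [List.cons_append]
          simp only [pvSuffix]
          rw [if_neg h0, if_neg (by simp [h1]), (ih hts').1 N, hLV]
        · simp only [pvSuffix]
          rw [if_neg h0, if_neg (by simp [h1]), (ih hts').2, hLV]
      · have hLV : pvLV (ℓ :: r) = PySem.Chars.strip ℓ :: pvLV r := by simp [pvLV, h1]
        constructor
        · intro N
          rw [List.cons_append]
          simp only [pvSuffix]
          rw [if_neg h0, if_pos h1, (ih hts').1 N, hLV]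
          simp [pvInner]
        · simp only [pvSuffix]
          rw [if_neg h0, if_pos h1, (ih hts').2, hLV]
          simp [pvInner]

lemma pv_suffix_piece (M : List (List Char)) :
    pvShape M → ∀ v vs, pvLV M = v :: vs →
      (∀ N, pvSuffix (M ++ [] :: N) true = pvRendN (v :: vs) ++ pvSuffix N true) ∧
        pvSuffix M true = pvRendN (v :: vs) := by
  induction M with
  | nil => intro _ v vs hv; cases hv
  | cons ℓ r ih =>
    intro hsh v vs hv
    by_cases h1 : PySem.Chars.strip ℓ = []
    · have hLV : pvLV (ℓ :: r) = pvLV r := by simp [pvLV, h1]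
      rw [hLV] at hv
      have hrec := ih (pv_shape_tail ℓ r hsh) v vs hv
      by_cases h0 : ℓ = []
      · subst h0
        constructor
        · intro N
          rw [List.cons_append]
          simp only [pvSuffix]
          rw [if_pos trivial]
          exact hrec.1 N
        · simp only [pvSuffix]
          rw [if_pos trivial]
          exact hrec.2
      · constructor
        · intro N
          rw [List.cons_append]
          simp only [pvSuffix]
          rw [if_neg h0, if_neg (by simp [h1])]
          exact hrec.1 N
        · simp only [pvSuffix]
          rw [if_neg h0, if_neg (by simp [h1])]
          exact hrec.2
    · have h0 : ℓ ≠ [] := by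
        intro hn
        subst hn
        exact h1 rfl
      have hLV : pvLV (ℓ :: r) = PySem.Chars.strip ℓ :: pvLV r := by simp [pvLV, h1]
      rw [hLV] at hv
      obtain ⟨hv1, hv2⟩ := List.cons.inj hv
      have hts : pvTailShape r := pv_shape_tailshape ℓ r hsh
      constructor
      · intro N
        rw [List.cons_append]
        simp only [pvSuffix]
        rw [if_neg h0, if_pos h1, (pv_suffix_run r hts).1 N, hv1, hv2]
        simp [pvRendN, pvRend1, List.append_assoc]
      · simp only [pvSuffix]
        rw [if_neg h0, if_pos h1, (pv_suffix_run r hts).2, hv1, hv2]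
        simp [pvRendN, pvRend1]

lemma pv_first_piece (M : List (List Char)) :
    pvShape M → ∀ v vs, pvLV M = v :: vs →
      (∀ N, pvFirst (M ++ [] :: N) = pvRend1 (v :: vs) ++ pvSuffix N true) ∧
        pvFirst M = pvRend1 (v :: vs) := by
  induction M with
  | nil => intro _ v vs hv; cases hv
  | cons ℓ r ih =>
    intro hsh v vs hv
    by_cases h1 : PySem.Chars.strip ℓ = []
    · have hLV : pvLV (ℓ :: r) = pvLV r := by simp [pvLV, h1]
      rw [hLV] at hv
      have hrec := ih (pv_shape_tail ℓ r hsh) v vs hv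
      constructor
      · intro N
        rw [List.cons_append]
        simp only [pvFirst]
        rw [if_pos h1]
        exact hrec.1 N
      · simp only [pvFirst]
        rw [if_pos h1]
        exact hrec.2
    · have hLV : pvLV (ℓ :: r) = PySem.Chars.strip ℓ :: pvLV r := by simp [pvLV, h1]
      rw [hLV] at hv
      obtain ⟨hv1, hv2⟩ := List.cons.inj hv
      have hts : pvTailShape r := pv_shape_tailshape ℓ r hsh
      constructor
      · intro N
        rw [List.cons_append]
        simp only [pvFirst]
        rw [if_neg h1, (pv_suffix_run r hts).1 N, hv1, hv2]
        simp [pvRend1, List.append_assoc]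
      · simp only [pvFirst]
        rw [if_neg h1, (pv_suffix_run r hts).2, hv1, hv2]
        simp [pvRend1]

lemma pv_suffix_pieces (P : List (List Char)) :
    (∀ p ∈ P, pvShape (pvLines p)) →
    pvSuffix (List.intercalate [[]] (P.map pvLines)) true
      = (((P.map (fun p => pvLV (pvLines p))).filter (fun g => g ≠ [])).map pvRendN).flatten := by
  induction P with
  | nil => intro _; rfl
  | cons q P ih =>
    intro h
    have hq := h q (by simp)
    have ih' := ih (fun p hp => h p (List.mem_cons_of_mem q hp))
    cases P with
    | nil =>
      rw [List.map_cons, List.map_nil, pv_ic_single]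
      by_cases hg : pvLV (pvLines q) = []
      · rw [pv_suffix_unkept _ (pv_lv_nil_unkept _ hg) true]
        simp [hg]
      · cases hgl : pvLV (pvLines q) with
        | nil => exact absurd hgl hg
        | cons v vs =>
          rw [(pv_suffix_piece (pvLines q) hq v vs hgl).2]
          simp [hgl]
    | cons q2 P2 =>
      rw [List.map_cons, pv_ic_cons [[]] (pvLines q) _ (by simp), List.append_assoc,
        List.singleton_append]
      by_cases hg : pvLV (pvLines q) = []
      · rw [pv_suffix_unkept_sep _ _ (pv_lv_nil_unkept _ hg) true, ih']
        simp [hg]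
      · cases hgl : pvLV (pvLines q) with
        | nil => exact absurd hgl hg
        | cons v vs =>
          rw [(pv_suffix_piece (pvLines q) hq v vs hgl).1 _, ih']
          simp [hgl]

lemma pv_first_pieces (P : List (List Char)) :
    (∀ p ∈ P, pvShape (pvLines p)) →
    pvFirst (List.intercalate [[]] (P.map pvLines))
      = pvOut ((P.map (fun p => pvLV (pvLines p))).filter (fun g => g ≠ [])) := by
  induction P with
  | nil => intro _; rfl
  | cons q P ih =>
    intro h
    have hq := h q (by simp)
    have ih' := ih (fun p hp => h p (List.mem_cons_of_mem q hp))
    cases P with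
    | nil =>
      rw [List.map_cons, List.map_nil, pv_ic_single]
      by_cases hg : pvLV (pvLines q) = []
      · rw [pv_first_unkept _ (pv_lv_nil_unkept _ hg)]
        simp [hg, pvOut]
      · cases hgl : pvLV (pvLines q) with
        | nil => exact absurd hgl hg
        | cons v vs =>
          rw [(pv_first_piece (pvLines q) hq v vs hgl).2]
          simp [hgl, pvOut]
    | cons q2 P2 =>
      rw [List.map_cons, pv_ic_cons [[]] (pvLines q) _ (by simp), List.append_assoc,
        List.singleton_append]
      by_cases hg : pvLV (pvLines q) = []
      · rw [pv_first_unkept_sep _ _ (pv_lv_nil_unkept _ hg), ih']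
        simp [hg]
      · cases hgl : pvLV (pvLines q) with
        | nil => exact absurd hgl hg
        | cons v vs =>
          rw [(pv_first_piece (pvLines q) hq v vs hgl).1 _,
            pv_suffix_pieces ((q2 :: P2)) (fun p hp => h p (List.mem_cons_of_mem q hp))]
          simp [hgl, pvOut]

lemma pv_groups_eq : ∀ (P : List (List Char)),
    ((P.map PySem.Chars.strip).filter (fun v => v ≠ [])).map pvVerses
      = (P.map (fun p => pvLV (pvLines p))).filter (fun g => g ≠ []) := by
  intro P
  induction P with
  | nil => rfl
  | cons p P ih =>
    by_cases hsp : PySem.Chars.strip p = []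
    · have h2 : pvLV (pvLines p) = [] := pv_strip_nil_verses p hsp
      simp only [List.map_cons, List.filter_cons]
      simp only [hsp, h2]
      simp only [ne_eq] at ih ⊢
      simpa using ih
    · have h3 : pvVerses (PySem.Chars.strip p) = pvLV (pvLines p) := pv_lv_strip p
      have h4 : pvLV (pvLines p) ≠ [] := by
        rw [← h3]
        exact pv_verses_of_strip p hsp
      simp only [List.map_cons, List.filter_cons]
      simp only [ne_eq] at ih ⊢
      simp [hsp, h4, h3]
      simpa using ih

-- B computes pvFirst of the lines of s
lemma pv_first_eq (s : List Char) :
    pvFirst (pvLines s) = pvOut ((pvEs s).map pvVerses) := by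
  have hshapes : ∀ p ∈ PySem.Chars.splitOn s ['\n', '\n'], pvShape (pvLines p) :=
    fun p hp => pv_piece_shape p (pv_splitOn_not_infix ['\n', '\n'] (by simp) s p hp)
  rw [show pvLines s
      = List.intercalate [[]] ((PySem.Chars.splitOn s ['\n', '\n']).map pvLines) from
    (pv_lines_pieces s).symm]
  rw [pv_first_pieces _ hshapes]
  rw [show (pvEs s).map pvVerses
      = ((PySem.Chars.splitOn s ['\n', '\n']).map (fun p => pvLV (pvLines p))).filter
          (fun g => g ≠ []) from pv_groups_eq _]

-- ---------- A-side closed form ----------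

lemma pv_inner_foldl {α β : Type} (f : α → β) (l : List α) (acc : List β) :
    l.foldl (fun a v => a ++ [f v]) acc = acc ++ l.map f := by
  induction l generalizing acc <;> simp [*]

-- A's sentinel-joined flat list equals the two-level join plus one trailing '\n'
lemma pv_main_join (es : List (List (List Char))) (h : ∀ x ∈ es, x ≠ []) :
    List.intercalate ['\n'] (es.flatMap (fun x => x ++ [[]]))
      = (if es = [] then []
         else List.intercalate ['\n', '\n'] (es.map (List.intercalate ['\n'])) ++ ['\n']) := by
  induction es with
  | nil => simp [List.intercalate]
  | cons x es ih =>
    have hx : x ≠ [] := h x (by simp)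
    have hx' : x ++ [([] : List Char)] ≠ [] := by simp
    simp only [List.flatMap_cons, if_neg (List.cons_ne_nil x es)]
    cases es with
    | nil =>
      simp only [List.flatMap_nil, List.append_nil]
      rw [pv_ic_append ['\n'] x [[]] hx (by simp)]
      simp [List.intercalate]
    | cons y es' =>
      have hes : (y :: es') ≠ ([] : List (List (List Char))) := by simp
      have hflat : (y :: es').flatMap (fun x => x ++ [[]]) ≠ [] := by
        simp [List.flatMap_cons]
      rw [pv_ic_append ['\n'] (x ++ [[]]) _ hx' hflat,
        pv_ic_append ['\n'] x [[]] hx (by simp),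
        ih (fun z hz => h z (by simp [hz])), if_neg hes]
      conv_rhs => rw [List.map_cons,
        pv_ic_cons ['\n', '\n'] (List.intercalate ['\n'] x)
          ((y :: es').map (List.intercalate ['\n'])) (by simp)]
      simp [List.intercalate, List.append_assoc]

lemma pv_strip_append_nl (s : List Char) :
    PySem.Chars.strip (s ++ ['\n']) = PySem.Chars.strip s := by
  unfold PySem.Chars.strip PySem.Chars.lstrip PySem.Chars.rstrip
  rw [List.dropWhile_append]
  split_ifs with h
  · rw [List.isEmpty_iff.mp h]
    simp [PySem.Chars.isspace]
  · rw [List.reverse_append]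
    simp [PySem.Chars.isspace, List.dropWhile_cons_of_pos]

-- bridge: the string-level ports compute the Chars-level expressions
lemma pv_filter_map_strip (l : List String) :
    ((l.map PySem.Str.strip).filter (fun v => v ≠ "")).map String.toList
      = ((l.map String.toList).map PySem.Chars.strip).filter (fun v => v ≠ []) := by
  induction l with
  | nil => rfl
  | cons a l ih =>
    simp only [List.map_map] at ih
    by_cases h : PySem.Str.strip a = ""
    · have h2 : PySem.Chars.strip a.toList = [] := by
        have := congrArg String.toList h
        simpa using this
      simpa [h, h2] using ih
    · have h2 : PySem.Chars.strip a.toList ≠ [] := by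
        intro hc
        exact h (by
          have : (PySem.Str.strip a).toList = "".toList := by simpa using hc
          exact String.toList_inj.mp this)
      simpa [h, h2] using ih

lemma pv_split_toList (s : String) (sep : String) (hsep : sep ≠ "") :
    ((PySem.Str.split? s sep).getD []).map String.toList
      = PySem.Chars.splitOn s.toList sep.toList := by
  have h := PySem.Str.split?_map s sep
  unfold PySem.Chars.split? at h
  have hsep' : sep.toList.isEmpty = false := by
    cases hs : sep.toList with
    | nil => exact absurd (String.toList_inj.mp (by simp [hs])) hsep
    | cons a l => simp
  rw [hsep'] at h
  simp only [Bool.false_eq_true, if_false] at h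
  cases hopt : PySem.Str.split? s sep with
  | none => rw [hopt] at h; simp at h
  | some l => rw [hopt] at h; simpa using h

lemma pv_estrofas_toList (text : String) :
    ((((PySem.Str.split? text "\n\n").getD []).map PySem.Str.strip).filter
      (fun e => e ≠ "")).map String.toList = pvEs text.toList := by
  rw [pv_filter_map_strip, pv_split_toList text "\n\n" (by decide)]
  unfold pvEs
  rw [show "\n\n".toList = ['\n', '\n'] from by decide]

lemma pv_versos_toList (e : String) :
    ((((PySem.Str.split? e "\n").getD []).map PySem.Str.strip).filter
      (fun v => v ≠ "")).map String.toList = pvVerses e.toList := by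
  rw [pv_filter_map_strip, pv_split_toList e "\n" (by decide)]
  unfold pvVerses
  rw [show "\n".toList = ['\n'] from by decide]

lemma pv_lineblock_toList (e : String) :
    (((((PySem.Str.split? e "\n").getD []).map PySem.Str.strip).filter
        (fun v => v ≠ "")).map (fun verso => "  " ++ verso) ++ [""]).map String.toList
      = pvInd e.toList ++ [[]] := by
  rw [List.map_append, List.map_map]
  unfold pvInd
  rw [← pv_versos_toList e]
  simp [List.map_map, Function.comp, String.toList_append]

lemma pv_portA_eq (text : String) (h : ¬ text = "") :
    format_as_lyrics_py text
      = String.ofList (PySem.Chars.strip (List.intercalate ['\n']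
          ((pvEs text.toList).flatMap (fun e => pvInd e ++ [[]])))) := by
  unfold format_as_lyrics_py
  rw [if_neg h]
  rw [← String.toList_inj]
  simp only [PySem.Str.toList_strip, PySem.Str.toList_join, String.toList_ofList,
    pv_inner_foldl, List.append_assoc, PySem.List.foldl_append_eq_flatMap, List.nil_append,
    pv_join_eq]
  congr 1
  have h1 : "\n".toList = ['\n'] := by decide
  rw [h1]
  congr 1
  rw [List.map_flatMap, ← pv_estrofas_toList text, List.flatMap_map]
  congr 1
  funext e
  exact pv_lineblock_toList e

-- A's closed form in terms of pvOut
lemma pv_block_rend (v : List Char) (vs : List (List Char)) :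
    List.intercalate ['\n'] ((v :: vs).map (fun l => ' ' :: ' ' :: l))
      = ' ' :: ' ' :: (v ++ pvInner vs) := by
  induction vs generalizing v with
  | nil =>
    rw [List.map_cons, List.map_nil, pv_ic_single]
    simp [pvInner]
  | cons w vs ih =>
    rw [List.map_cons, pv_ic_cons ['\n'] _ _ (by simp), ih w]
    simp [pvInner, List.append_assoc]

lemma pv_join2_out : ∀ (gs : List (List (List Char))) (g : List (List Char)),
    g ≠ [] → (∀ x ∈ gs, x ≠ []) →
    List.intercalate ['\n', '\n']
        ((g :: gs).map (fun g => List.intercalate ['\n'] (g.map (fun l => ' ' :: ' ' :: l))))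
      = ' ' :: ' ' :: pvOut (g :: gs) := by
  intro gs
  induction gs with
  | nil =>
    intro g hg _
    rw [List.map_cons, List.map_nil, pv_ic_single]
    cases g with
    | nil => exact absurd rfl hg
    | cons v vs =>
      rw [pv_block_rend v vs]
      simp [pvOut, pvRend1]
  | cons g2 gs ih =>
    intro g hg hx
    rw [List.map_cons, pv_ic_cons ['\n', '\n'] _ _ (by simp),
      ih g2 (hx g2 (by simp)) (fun x hxx => hx x (List.mem_cons_of_mem g2 hxx))]
    cases g with
    | nil => exact absurd rfl hg
    | cons v vs =>
      rw [pv_block_rend v vs]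
      simp [pvOut, pvRendN, pvRend1, List.append_assoc]

lemma pv_rend1_last (g : List (List Char)) (hg : g ≠ [])
    (hv : ∀ v ∈ g, PySem.Chars.strip v = v ∧ v ≠ []) :
    ∃ y d, pvRend1 g = y ++ [d] ∧ PySem.Chars.isspace d = false := by
  cases g with
  | nil => exact absurd rfl hg
  | cons v vs =>
    rcases List.eq_nil_or_concat vs with rfl | ⟨vs', w, hvs⟩
    · have hvv := hv v (by simp)
      obtain ⟨y, d, hyd, hd⟩ := pv_strip_last_not_space v (by rw [hvv.1]; exact hvv.2)
      rw [hvv.1] at hyd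
      exact ⟨y, d, by simp [pvRend1, pvInner, hyd], hd⟩
    · rw [List.concat_eq_append] at hvs
      subst hvs
      have hw := hv w (by simp)
      obtain ⟨y, d, hyd, hd⟩ := pv_strip_last_not_space w (by rw [hw.1]; exact hw.2)
      rw [hw.1] at hyd
      refine ⟨v ++ (pvInner vs' ++ ('\n' :: ' ' :: ' ' :: y)), d, ?_, hd⟩
      simp [pvRend1, pvInner, hyd, List.append_assoc]

lemma pv_strip_idem (v : List Char) : PySem.Chars.strip (PySem.Chars.strip v) = PySem.Chars.strip v := by
  by_cases h : PySem.Chars.strip v = []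
  · rw [h]; rfl
  · obtain ⟨c, t, hct, hc⟩ := pv_strip_head_not_space v h
    obtain ⟨y, d, hyd, hd⟩ := pv_strip_last_not_space v h
    have h1 : PySem.Chars.strip (PySem.Chars.strip v)
        = PySem.Chars.rstrip (PySem.Chars.strip v) := by
      show PySem.Chars.rstrip (PySem.Chars.lstrip _) = _
      rw [hct, pv_lstrip_fix c t hc, ← hct]
    rw [h1, hyd, pv_rstrip_fix y d hd]

lemma pv_out_strip (gs : List (List (List Char))) (hgs : gs ≠ [])
    (hv : ∀ g ∈ gs, g ≠ [] ∧ ∀ v ∈ g, PySem.Chars.strip v = v ∧ v ≠ []) :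
    PySem.Chars.strip (' ' :: ' ' :: pvOut gs) = pvOut gs := by
  cases gs with
  | nil => exact absurd rfl hgs
  | cons g gs' =>
    have hg := hv g (by simp)
    cases g with
    | nil => exact absurd rfl hg.1
    | cons v vs =>
      have hvv := hg.2 v (by simp)
      obtain ⟨c, t, hct, hc⟩ := pv_strip_head_not_space v (by rw [hvv.1]; exact hvv.2)
      rw [hvv.1] at hct
      have hlast : ∃ Y d, pvOut ((v :: vs) :: gs') = Y ++ [d] ∧
          PySem.Chars.isspace d = false := by
        rcases List.eq_nil_or_concat gs' with rfl | ⟨gs'', hG, hEq⟩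
        · obtain ⟨y, d, hyd, hd⟩ := pv_rend1_last (v :: vs) (by simp) hg.2
          exact ⟨y, d, by simp [pvOut, hyd], hd⟩
        · rw [List.concat_eq_append] at hEq
          subst hEq
          have hGne := hv hG (by simp)
          obtain ⟨y, d, hyd, hd⟩ := pv_rend1_last hG hGne.1 hGne.2
          refine ⟨pvRend1 (v :: vs)
            ++ ((gs''.map pvRendN).flatten ++ ('\n' :: '\n' :: ' ' :: ' ' :: y)), d, ?_, hd⟩
          simp [pvOut, pvRendN, hyd, List.append_assoc]
      obtain ⟨Y, d, hYd, hd⟩ := hlast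
      have hZ : pvOut ((v :: vs) :: gs')
          = c :: (t ++ (pvInner vs ++ (gs'.map pvRendN).flatten)) := by
        simp [pvOut, pvRend1, hct, List.append_assoc]
      show PySem.Chars.rstrip (PySem.Chars.lstrip _) = _
      have h1 : PySem.Chars.lstrip (' ' :: ' ' :: pvOut ((v :: vs) :: gs'))
          = PySem.Chars.lstrip (pvOut ((v :: vs) :: gs')) := by
        unfold PySem.Chars.lstrip
        rw [List.dropWhile_cons_of_pos (by decide), List.dropWhile_cons_of_pos (by decide)]
      rw [h1, hZ, pv_lstrip_fix _ _ hc, ← hZ, hYd, pv_rstrip_fix Y d hd, ← hYd]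

lemma pv_verses_mem (e v : List Char) (hv : v ∈ pvVerses e) :
    PySem.Chars.strip v = v ∧ v ≠ [] := by
  unfold pvVerses at hv
  obtain ⟨hm, hne⟩ := List.mem_filter.mp hv
  obtain ⟨ℓ, _, rfl⟩ := List.mem_map.mp hm
  exact ⟨pv_strip_idem ℓ, by simpa using hne⟩

lemma pv_es_mem (s e : List Char) (he : e ∈ pvEs s) :
    PySem.Chars.strip e = e ∧ e ≠ [] := by
  unfold pvEs at he
  obtain ⟨hm, hne⟩ := List.mem_filter.mp he
  obtain ⟨p, _, rfl⟩ := List.mem_map.mp hm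
  exact ⟨pv_strip_idem p, by simpa using hne⟩

lemma pv_es_good (s : List Char) :
    ∀ x ∈ (pvEs s).map pvVerses, x ≠ [] ∧ ∀ v ∈ x, PySem.Chars.strip v = v ∧ v ≠ [] := by
  intro x hx
  obtain ⟨e, he, rfl⟩ := List.mem_map.mp hx
  have hm := pv_es_mem s e he
  constructor
  · have h2 : PySem.Chars.strip e ≠ [] := by rw [hm.1]; exact hm.2
    have h3 := pv_verses_of_strip e h2
    rwa [hm.1] at h3
  · exact fun v hv => pv_verses_mem e v hv

-- ---------- B port bridge ----------

lemma pv_fold_suffix : ∀ (L : List (List Char)) (o : List Char) (p : Bool), o ≠ [] →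
    (L.foldl pvStep (o, p)).1 = o ++ pvSuffix L p := by
  intro L
  induction L with
  | nil => intro o p _; simp [pvSuffix]
  | cons ℓ L ih =>
    intro o p ho
    rw [List.foldl_cons]
    by_cases h0 : ℓ = []
    · subst h0
      have hstep : pvStep (o, p) [] = (o, true) := by simp [pvStep]
      rw [hstep, ih o true ho]
      simp only [pvSuffix]
      rw [if_pos trivial]
    · by_cases h1 : PySem.Chars.strip ℓ = []
      · have hstep : pvStep (o, p) ℓ = (o, p) := by simp [pvStep, h0, h1]
        rw [hstep, ih o p ho]
        simp only [pvSuffix]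
        rw [if_neg h0, if_neg (by simp [h1])]
      · have hstep : pvStep (o, p) ℓ
            = (o ++ (if p then ['\n', '\n'] else ['\n']) ++ ' ' :: ' ' :: PySem.Chars.strip ℓ,
              false) := by
          simp [pvStep, h0, h1, ho]
        rw [hstep, ih _ false (by simp)]
        simp only [pvSuffix]
        rw [if_neg h0, if_pos h1]
        simp [List.append_assoc]

lemma pv_fold_first : ∀ (L : List (List Char)) (p : Bool),
    (L.foldl pvStep ([], p)).1 = pvFirst L := by
  intro L
  induction L with
  | nil => intro p; rfl
  | cons ℓ L ih =>
    intro p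
    rw [List.foldl_cons]
    by_cases h1 : PySem.Chars.strip ℓ = []
    · by_cases h0 : ℓ = []
      · subst h0
        have hstep : pvStep (([] : List Char), p) [] = ([], true) := by simp [pvStep]
        rw [hstep, ih true]
        simp only [pvFirst]
        rw [if_pos pv_strip_nil]
      · have hstep : pvStep (([] : List Char), p) ℓ = ([], p) := by simp [pvStep, h0, h1]
        rw [hstep, ih p]
        simp only [pvFirst]
        rw [if_pos h1]
    · have h0 : ℓ ≠ [] := fun hn => h1 (by rw [hn]; rfl)
      have hstep : pvStep (([] : List Char), p) ℓ = (PySem.Chars.strip ℓ, false) := by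
        simp [pvStep, h0, h1]
      rw [hstep, pv_fold_suffix L (PySem.Chars.strip ℓ) false h1]
      simp only [pvFirst]
      rw [if_neg h1]

def pvStepS (st : String × Bool) (line : String) : String × Bool :=
  let verse := PySem.Str.strip line
  if line = "" then (st.1, true)
  else if verse ≠ "" then
    ((if st.1 = "" then verse
      else st.1 ++ (if st.2 then "\n\n" else "\n") ++ "  " ++ verse), false)
  else st

lemma pv_portB_fold (text : String) (h : ¬ text = "") :
    format_as_lyrics_py_alt text
      = (((PySem.Str.split? text "\n").getD []).foldl pvStepS ("", false)).1 := by
  unfold format_as_lyrics_py_alt pvStepS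
  rw [if_neg h]

lemma pv_stepS_eq (st : String × Bool) (line : String) :
    ((pvStepS st line).1.toList, (pvStepS st line).2)
      = pvStep (st.1.toList, st.2) line.toList := by
  unfold pvStepS pvStep
  by_cases h0 : line = ""
  · subst h0
    simp
  · have h0' : line.toList ≠ [] := fun hc => h0 (String.toList_inj.mp (by simpa using hc))
    by_cases h1 : PySem.Str.strip line = ""
    · have h1' : PySem.Chars.strip line.toList = [] := by
        have := congrArg String.toList h1
        simpa using this
      simp [h0, h1, h0', h1']
    · have h1' : PySem.Chars.strip line.toList ≠ [] := fun hc =>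
        h1 (String.toList_inj.mp (by simpa using hc))
      by_cases h2 : st.1 = ""
      · have h2' : st.1.toList = [] := by rw [h2]; rfl
        simp [h0, h1, h0', h1', h2]
      · have h2' : st.1.toList ≠ [] := fun hc => h2 (String.toList_inj.mp (by simpa using hc))
        cases h3 : st.2 <;>
          simp [h0, h1, h0', h1', h2, h2', String.toList_append]

lemma pv_fold_str : ∀ (L : List String) (st : String × Bool),
    (((L.foldl pvStepS st).1).toList, (L.foldl pvStepS st).2)
      = (L.map String.toList).foldl pvStep (st.1.toList, st.2) := by
  intro L
  induction L with
  | nil => intro st; rfl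
  | cons a L ih =>
    intro a2
    rw [List.foldl_cons, List.map_cons, List.foldl_cons, ih (pvStepS a2 a), pv_stepS_eq a2 a]

lemma pv_portB_eq (text : String) (h : ¬ text = "") :
    format_as_lyrics_py_alt text = String.ofList (pvFirst (pvLines text.toList)) := by
  rw [pv_portB_fold text h, ← String.toList_inj, String.toList_ofList]
  have hb := congrArg Prod.fst (pv_fold_str ((PySem.Str.split? text "\n").getD []) ("", false))
  simp only at hb
  rw [hb, pv_split_toList text "\n" (by decide)]
  rw [show ("\n" : String).toList = ['\n'] from rfl]
  exact pv_fold_first _ false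

-- ===== VERDICT (by name: the statement is the Claim_ definition above) =====
theorem format_as_lyrics_py_spec : Claim_equal_format_as_lyrics_py := by
  intro text _
  unfold Spec_format_as_lyrics_py
  by_cases h : text = ""
  · simp [format_as_lyrics_py, format_as_lyrics_py_alt, h]
  · rw [pv_portA_eq text h, pv_portB_eq text h, pv_first_eq]
    congr 1
    have hInd : ∀ x ∈ (pvEs text.toList).map pvInd, x ≠ [] := by
      intro x hx
      obtain ⟨e, he, rfl⟩ := List.mem_map.mp hx
      have hgood := pv_es_good text.toList (pvVerses e) (List.mem_map_of_mem he)
      simpa [pvInd] using hgood.1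
    have hfm : (pvEs text.toList).flatMap (fun e => pvInd e ++ [[]])
        = ((pvEs text.toList).map pvInd).flatMap (fun x => x ++ [[]]) := by
      rw [List.flatMap_map]
    rw [hfm]
    rw [pv_main_join _ hInd]
    by_cases hE : (pvEs text.toList).map pvInd = []
    · rw [if_pos hE]
      have hnil : pvEs text.toList = [] := by simpa using hE
      rw [hnil]
      rfl
    · rw [if_neg hE, pv_strip_append_nl]
      have hmm : ((pvEs text.toList).map pvInd).map (List.intercalate ['\n'])
          = ((pvEs text.toList).map pvVerses).map
              (fun g => List.intercalate ['\n'] (g.map (fun l => ' ' :: ' ' :: l))) := by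
        simp [List.map_map, Function.comp, pvInd]
      rw [hmm]
      cases hES : (pvEs text.toList).map pvVerses with
      | nil =>
        have hnil : pvEs text.toList = [] := by simpa using hES
        rw [hnil] at hE
        simp at hE
      | cons g gs' =>
        have hgood : ∀ x ∈ g :: gs', x ≠ [] ∧ ∀ v ∈ x, PySem.Chars.strip v = v ∧ v ≠ [] := by
          intro x hx
          rw [← hES] at hx
          exact pv_es_good text.toList x hx
        rw [pv_join2_out gs' g (hgood g (by simp)).1
          (fun x hx => (hgood x (List.mem_cons_of_mem g hx)).1)]
        exact pv_out_strip (g :: gs') (by simp) hgood
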